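-- pv_equiv track=rewrite | github.com/jaberg/skdata | skdata/posner_keele/dataset.py | int_spiral
-- ===== SOURCE A (Python) =====
-- def int_spiral(N):
--     """
--     Return a list of 2d locations forming a spiral
--     (0, 0),
--     (1, 0), (1, 1), (0, 1), (-1, 1), (-1, 0), (-1, -1), (0, -1), (1, -1),
--     (2, -1), (2, 0), ...
--     """
--
--     def cw(a, b):
--         if (a, b) == (1, 0):
--             return (0, 1)
--         elif (a, b) == (0, 1):
--             return (-1, 0)
--         elif (a, b) == (-1, 0):
--             return (0, -1)
--         else:
--             return (1, 0)
--
--     rval = []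
--     seen = set()
--     rval.append((0, 0))
--     seen.add((0, 0))
--
--     i, j = 1, 0
--     ti, tj = -1, 0
--     di, dj = 0, 1
--
--     while len(rval) < N:
--         assert (i, j) not in seen
--         rval.append((i, j))
--         seen.add((i, j))
--         if (i + ti, j + tj) in seen:
--             i += di
--             j += dj
--         else: # -- turn a corner
--             ti, tj = cw(ti, tj)
--             di, dj = cw(di, dj)
--             i += di
--             j += dj
--     return rval
-- ===== SOURCE B (Python) =====
-- def int_spiral(N):
--     """
--     Return a list of 2d locations forming a spiral
--     (0, 0),
--     (1, 0), (1, 1), (0, 1), (-1, 1), (-1, 0), (-1, -1), (0, -1), (1, -1),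
--     (2, -1), (2, 0), ...
--     """
--     rval = [(0, 0)]
--     dirs = [(1, 0), (0, 1), (-1, 0), (0, -1)]
--     x = y = 0
--     d = 0        # index into dirs
--     leg = 1      # length of the current straight segment
--     rem = 1      # steps remaining in the current segment
--     grow = False # the segment length grows after every second turn
--     while len(rval) < N:
--         dx, dy = dirs[d]
--         x += dx
--         y += dy
--         rval.append((x, y))
--         rem -= 1
--         if rem == 0:
--             d = (d + 1) % 4
--             if grow:
--                 leg += 1
--             grow = not grow
--             rem = leg
--     return rval
-- ===== Notes on version B (the rewrite author's own statement) =====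
-- stated objective: simpler
-- what changed: A grows the spiral by keeping a set of visited cells and turning whenever the look-ahead cell to the left is unvisited; B keeps no set at all and turns by the closed run-length schedule 1,1,2,2,3,3,... (direction index cycling through right/up/left/down).
import Mathlib
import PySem

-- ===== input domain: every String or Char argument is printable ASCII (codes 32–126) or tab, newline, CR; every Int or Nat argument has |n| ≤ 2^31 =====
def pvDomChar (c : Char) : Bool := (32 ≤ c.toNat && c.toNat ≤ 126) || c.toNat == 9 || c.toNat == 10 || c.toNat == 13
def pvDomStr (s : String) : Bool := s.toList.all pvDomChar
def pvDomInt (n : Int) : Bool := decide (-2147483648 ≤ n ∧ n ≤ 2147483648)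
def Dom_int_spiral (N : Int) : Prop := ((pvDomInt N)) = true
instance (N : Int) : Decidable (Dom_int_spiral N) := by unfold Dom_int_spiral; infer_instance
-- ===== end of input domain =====

-- B replaces A's seen-set + corner look-ahead by a pure run-length segment schedule (1,1,2,2,3,3,…): no auxiliary set, simpler turning rule.

-- ===== PORT A =====
-- helper cw(a, b) of A
def pvCw (a b : Int) : Int × Int :=
  if (a, b) = ((1 : Int), (0 : Int)) then (0, 1)
  else if (a, b) = ((0 : Int), (1 : Int)) then (-1, 0)
  else if (a, b) = ((-1 : Int), (0 : Int)) then (0, -1)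
  else (1, 0)

-- A's while-loop, recursing on a fuel counter that only guards totality: the loop appends
-- one point per iteration, so (N - 1).toNat iterations always suffice and the 'len(rval) < N'
-- test below is what actually stops the loop, exactly as in the Python.
-- The Python 'assert (i, j) not in seen' never fails on A's reachable states, so it is not modelled.
def pvLoopA (N : Int) : Nat → List (Int × Int) → PySem.Set (Int × Int) →
    Int → Int → Int → Int → Int → Int → List (Int × Int)
  | 0, rval, _, _, _, _, _, _, _ => rval
  | fuel + 1, rval, seen, i, j, ti, tj, di, dj =>
    if (rval.length : Int) < N then
      if PySem.Set.contains (PySem.Set.add seen (i, j)) (i + ti, j + tj) then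
        pvLoopA N fuel (rval ++ [(i, j)]) (PySem.Set.add seen (i, j)) (i + di) (j + dj) ti tj di dj
      else
        pvLoopA N fuel (rval ++ [(i, j)]) (PySem.Set.add seen (i, j))
          (i + (pvCw di dj).1) (j + (pvCw di dj).2)
          (pvCw ti tj).1 (pvCw ti tj).2 (pvCw di dj).1 (pvCw di dj).2
    else rval

def int_spiral (N : Int) : List (Int × Int) :=
  pvLoopA N (N - 1).toNat [(0, 0)] (PySem.Set.add PySem.Set.empty (0, 0)) 1 0 (-1) 0 0 1

-- ===== PORT B =====
def pvDirs : List (Int × Int) := [(1, 0), (0, 1), (-1, 0), (0, -1)]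

-- dirs[d]; d is kept in {0,1,2,3} by '% 4', so the IndexError case never occurs and the default is never used
def pvDir (d : Int) : Int × Int := (PySem.List.pyGet? pvDirs d).getD (0, 0)

-- B's while-loop, on the same totality-only fuel counter (one point is appended per iteration)
def pvLoopB (N : Int) : Nat → List (Int × Int) → Int → Int → Int → Int → Int → Bool →
    List (Int × Int)
  | 0, rval, _, _, _, _, _, _ => rval
  | fuel + 1, rval, x, y, d, leg, rem, grow =>
    if (rval.length : Int) < N then
      if rem - 1 = 0 then
        pvLoopB N fuel (rval ++ [(x + (pvDir d).1, y + (pvDir d).2)])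
          (x + (pvDir d).1) (y + (pvDir d).2) (PySem.Int.mod (d + 1) 4)
          (if grow then leg + 1 else leg) (if grow then leg + 1 else leg) (!grow)
      else
        pvLoopB N fuel (rval ++ [(x + (pvDir d).1, y + (pvDir d).2)])
          (x + (pvDir d).1) (y + (pvDir d).2) d leg (rem - 1) grow
    else rval

def int_spiral_alt (N : Int) : List (Int × Int) :=
  pvLoopB N (N - 1).toNat [(0, 0)] 0 0 0 1 1 false

-- ===== PRECONDITION & SPEC =====
def Spec_int_spiral (N : Int) (out : List (Int × Int)) : Prop := out = int_spiral_alt N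
instance (N : Int) (out : List (Int × Int)) : Decidable (Spec_int_spiral N out) := by unfold Spec_int_spiral; infer_instance

-- ===== CLAIM (what is proved, stated in full; the proofs are below) =====
def Claim_equal_int_spiral : Prop := ∀ (N : Int), Dom_int_spiral N → Spec_int_spiral N (int_spiral N)

-- ===== LEMMAS AND PROOFS =====

lemma pvDir_0 : pvDir 0 = (1, 0) := by decide
lemma pvDir_1 : pvDir 1 = (0, 1) := by decide
lemma pvDir_2 : pvDir 2 = (-1, 0) := by decide
lemma pvDir_3 : pvDir 3 = (0, -1) := by decide
lemma pvCw_10 : pvCw 1 0 = (0, 1) := by decide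
lemma pvCw_01 : pvCw 0 1 = (-1, 0) := by decide
lemma pvCw_m10 : pvCw (-1) 0 = (0, -1) := by decide
lemma pvCw_0m1 : pvCw 0 (-1) = (1, 0) := by decide

-- Lockstep invariant between A's loop state and B's loop state at the top of an iteration
-- (valid from the second iteration on).  r parametrises the current ring; the last conjunct
-- of each case characterises the seen-set exactly as a union of linear regions.
def pvInv (seen : PySem.Set (Int × Int)) (i j ti tj di dj x y d leg rem : Int) (grow : Bool) : Prop :=
  ∃ r : Int, 0 ≤ r ∧
    ((d = 0 ∧ y = -r ∧ -r ≤ x ∧ x ≤ r ∧ leg = 2*r+1 ∧ rem = r+1-x ∧ grow = false ∧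
        i = x + 1 ∧ j = -r ∧ di = 1 ∧ dj = 0 ∧ ti = 0 ∧ tj = 1 ∧
        (∀ u v : Int, (u, v) ∈ seen ↔
          (-r ≤ u ∧ u ≤ r ∧ -r ≤ v ∧ v ≤ r ∧ ¬(v = -r ∧ x < u)))) ∨
     (d = 1 ∧ x = r+1 ∧ -r ≤ y ∧ y ≤ r ∧ leg = 2*r+1 ∧ rem = r+1-y ∧ grow = true ∧
        i = r+1 ∧ j = y+1 ∧ di = 0 ∧ dj = 1 ∧ ti = -1 ∧ tj = 0 ∧
        (∀ u v : Int, (u, v) ∈ seen ↔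
          ((-r ≤ u ∧ u ≤ r ∧ -r ≤ v ∧ v ≤ r) ∨ (u = r+1 ∧ -r ≤ v ∧ v ≤ y)))) ∨
     (d = 2 ∧ y = r+1 ∧ -r ≤ x ∧ x ≤ r+1 ∧ leg = 2*r+2 ∧ rem = r+1+x ∧ grow = false ∧
        i = x - 1 ∧ j = r+1 ∧ di = -1 ∧ dj = 0 ∧ ti = 0 ∧ tj = -1 ∧
        (∀ u v : Int, (u, v) ∈ seen ↔
          ((-r ≤ u ∧ u ≤ r ∧ -r ≤ v ∧ v ≤ r) ∨ (u = r+1 ∧ -r ≤ v ∧ v ≤ r+1) ∨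
           (v = r+1 ∧ x ≤ u ∧ u ≤ r)))) ∨
     (d = 3 ∧ x = -r-1 ∧ -r ≤ y ∧ y ≤ r+1 ∧ leg = 2*r+2 ∧ rem = r+1+y ∧ grow = true ∧
        i = -r-1 ∧ j = y-1 ∧ di = 0 ∧ dj = -1 ∧ ti = 1 ∧ tj = 0 ∧
        (∀ u v : Int, (u, v) ∈ seen ↔
          ((-r ≤ u ∧ u ≤ r ∧ -r ≤ v ∧ v ≤ r) ∨ (u = r+1 ∧ -r ≤ v ∧ v ≤ r+1) ∨
           (v = r+1 ∧ -r-1 ≤ u ∧ u ≤ r) ∨ (u = -r-1 ∧ y ≤ v ∧ v ≤ r+1)))))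

lemma pv_sync (n : Nat) : ∀ (N : Int) (rval : List (Int × Int)) (seen : PySem.Set (Int × Int))
    (i j ti tj di dj x y d leg rem : Int) (grow : Bool),
    pvInv seen i j ti tj di dj x y d leg rem grow →
    pvLoopA N n rval seen i j ti tj di dj = pvLoopB N n rval x y d leg rem grow := by
  induction n with
  | zero =>
    intro N rval seen i j ti tj di dj x y d leg rem grow _
    rfl
  | succ n ih =>
    intro N rval seen i j ti tj di dj x y d leg rem grow hInv
    simp only [pvLoopA, pvLoopB]
    by_cases hlt : (rval.length : Int) < N
    · rw [if_pos hlt, if_pos hlt]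
      obtain ⟨r, hr, hc⟩ := hInv
      rcases hc with ⟨hd, hy, hx1, hx2, hleg, hrem, hgrow, hi, hj, hdi, hdj, hti, htj, hseen⟩ |
        ⟨hd, hx, hy1, hy2, hleg, hrem, hgrow, hi, hj, hdi, hdj, hti, htj, hseen⟩ |
        ⟨hd, hy, hx1, hx2, hleg, hrem, hgrow, hi, hj, hdi, hdj, hti, htj, hseen⟩ |
        ⟨hd, hx, hy1, hy2, hleg, hrem, hgrow, hi, hj, hdi, hdj, hti, htj, hseen⟩
      -- d = 0 : rightwards along the bottom row y = -r
      · subst hd hy hleg hrem hi hj hdi hdj hti htj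
        rw [pvDir_0, pvCw_10, pvCw_01]
        simp only [add_zero, zero_add]
        by_cases hs : x + 1 ≤ r
        · -- mid-segment: test cell already seen, no turn
          have hm : ((x + 1, -r + 1) : Int × Int) ∈ PySem.Set.add seen (x + 1, -r) := by
            rw [PySem.Set.mem_add, hseen]; left; omega
          rw [if_pos ((PySem.Set.contains_iff _ _).mpr hm), if_neg (by omega : ¬(r + 1 - x - 1 = 0))]
          apply ih
          refine ⟨r, hr, Or.inl ⟨rfl, rfl, by omega, by omega, rfl, by omega, hgrow,
            by omega, rfl, rfl, rfl, rfl, rfl, fun u v => ?_⟩⟩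
          rw [PySem.Set.mem_add, hseen]
          simp only [Prod.mk.injEq]; omega
        · -- corner x = r: test cell unseen, turn up
          have hxr : x = r := by omega
          subst hxr
          have hm : ¬ (((x + 1, -x + 1) : Int × Int) ∈ PySem.Set.add seen (x + 1, -x)) := by
            rw [PySem.Set.mem_add, hseen]; simp only [Prod.mk.injEq]; omega
          rw [if_neg (fun hc => hm ((PySem.Set.contains_iff _ _).mp hc)),
              if_pos (by omega : x + 1 - x - 1 = 0)]
          have hmod : PySem.Int.mod (1 : Int) 4 = 1 := by decide
          rw [hmod, hgrow]
          simp only [Bool.false_eq_true, if_false, Bool.not_false]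
          apply ih
          refine ⟨x, hr, Or.inr (Or.inl ⟨rfl, rfl, by omega, by omega, rfl, by omega, rfl,
            rfl, rfl, rfl, rfl, rfl, rfl, fun u v => ?_⟩)⟩
          rw [PySem.Set.mem_add, hseen]
          simp only [Prod.mk.injEq]; omega
      -- d = 1 : upwards along the right column x = r+1
      · subst hd hx hleg hrem hi hj hdi hdj hti htj
        rw [pvDir_1, pvCw_01, pvCw_m10]
        simp only [add_zero, ← sub_eq_add_neg]
        by_cases hs : y + 1 ≤ r
        · have hm : ((r + 1 - 1, y + 1) : Int × Int) ∈ PySem.Set.add seen (r + 1, y + 1) := by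
            rw [PySem.Set.mem_add, hseen]; left; left; omega
          rw [if_pos ((PySem.Set.contains_iff _ _).mpr hm), if_neg (by omega : ¬(r + 1 - y - 1 = 0))]
          apply ih
          refine ⟨r, hr, Or.inr (Or.inl ⟨rfl, rfl, by omega, by omega, rfl, by omega, hgrow,
            rfl, rfl, rfl, rfl, rfl, rfl, fun u v => ?_⟩)⟩
          rw [PySem.Set.mem_add, hseen]
          simp only [Prod.mk.injEq]; omega
        · -- corner y = r: turn left
          have hyr : y = r := by omega
          subst hyr
          have hm : ¬ (((y + 1 - 1, y + 1) : Int × Int) ∈ PySem.Set.add seen (y + 1, y + 1)) := by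
            rw [PySem.Set.mem_add, hseen]; simp only [Prod.mk.injEq]; omega
          rw [if_neg (fun hc => hm ((PySem.Set.contains_iff _ _).mp hc)),
              if_pos (by omega : y + 1 - y - 1 = 0)]
          have hmod : PySem.Int.mod ((1:Int) + 1) 4 = 2 := by decide
          rw [hmod, hgrow]
          simp only [if_true, Bool.not_true]
          apply ih
          refine ⟨y, hr, Or.inr (Or.inr (Or.inl ⟨rfl, rfl, by omega, by omega, by omega, by omega, rfl,
            rfl, rfl, rfl, rfl, rfl, rfl, fun u v => ?_⟩))⟩
          rw [PySem.Set.mem_add, hseen]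
          simp only [Prod.mk.injEq]; omega
      -- d = 2 : leftwards along the top row y = r+1
      · subst hd hy hleg hrem hi hj hdi hdj hti htj
        rw [pvDir_2, pvCw_m10, pvCw_0m1]
        simp only [add_zero, ← sub_eq_add_neg]
        by_cases hs : -r ≤ x - 1
        · have hm : ((x - 1, r + 1 - 1) : Int × Int) ∈ PySem.Set.add seen (x - 1, r + 1) := by
            rw [PySem.Set.mem_add, hseen]; left; left; omega
          rw [if_pos ((PySem.Set.contains_iff _ _).mpr hm), if_neg (by omega : ¬(r + 1 + x - 1 = 0))]
          apply ih
          refine ⟨r, hr, Or.inr (Or.inr (Or.inl ⟨rfl, rfl, by omega, by omega, rfl, by omega, hgrow,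
            rfl, rfl, rfl, rfl, rfl, rfl, fun u v => ?_⟩))⟩
          rw [PySem.Set.mem_add, hseen]
          simp only [Prod.mk.injEq]; omega
        · -- corner x = -r: turn down
          have hxr : x = -r := by omega
          subst hxr
          have hm : ¬ (((-r - 1, r + 1 - 1) : Int × Int) ∈ PySem.Set.add seen (-r - 1, r + 1)) := by
            rw [PySem.Set.mem_add, hseen]; simp only [Prod.mk.injEq]; omega
          rw [if_neg (fun hc => hm ((PySem.Set.contains_iff _ _).mp hc)),
              if_pos (by omega : r + 1 + -r - 1 = 0)]
          have hmod : PySem.Int.mod ((2:Int) + 1) 4 = 3 := by decide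
          rw [hmod, hgrow]
          simp only [Bool.false_eq_true, if_false, Bool.not_false]
          apply ih
          refine ⟨r, hr, Or.inr (Or.inr (Or.inr ⟨rfl, rfl, by omega, by omega, rfl, by omega, rfl,
            rfl, rfl, rfl, rfl, rfl, rfl, fun u v => ?_⟩))⟩
          rw [PySem.Set.mem_add, hseen]
          simp only [Prod.mk.injEq]; omega
      -- d = 3 : downwards along the left column x = -r-1
      · subst hd hx hleg hrem hi hj hdi hdj hti htj
        rw [pvDir_3, pvCw_0m1, pvCw_10]
        simp only [add_zero, ← sub_eq_add_neg]
        by_cases hs : -r ≤ y - 1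
        · have hm : ((-r - 1 + 1, y - 1) : Int × Int) ∈ PySem.Set.add seen (-r - 1, y - 1) := by
            rw [PySem.Set.mem_add, hseen]; left; left; omega
          rw [if_pos ((PySem.Set.contains_iff _ _).mpr hm), if_neg (by omega : ¬(r + 1 + y - 1 = 0))]
          apply ih
          refine ⟨r, hr, Or.inr (Or.inr (Or.inr ⟨rfl, rfl, by omega, by omega, rfl, by omega, hgrow,
            rfl, rfl, rfl, rfl, rfl, rfl, fun u v => ?_⟩))⟩
          rw [PySem.Set.mem_add, hseen]
          simp only [Prod.mk.injEq]; omega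
        · -- corner y = -r: turn right into the next ring
          have hyr : y = -r := by omega
          subst hyr
          have hm : ¬ (((-r - 1 + 1, -r - 1) : Int × Int) ∈ PySem.Set.add seen (-r - 1, -r - 1)) := by
            rw [PySem.Set.mem_add, hseen]; simp only [Prod.mk.injEq]; omega
          rw [if_neg (fun hc => hm ((PySem.Set.contains_iff _ _).mp hc)),
              if_pos (by omega : r + 1 + -r - 1 = 0)]
          have hmod : PySem.Int.mod ((3:Int) + 1) 4 = 0 := by decide
          rw [hmod, hgrow]
          simp only [if_true, Bool.not_true]
          apply ih
          refine ⟨r + 1, by omega, Or.inl ⟨rfl, by omega, by omega, by omega, by omega, by omega, rfl,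
            by omega, by omega, rfl, rfl, rfl, rfl, fun u v => ?_⟩⟩
          rw [PySem.Set.mem_add, hseen]
          simp only [Prod.mk.injEq]; omega
    · rw [if_neg hlt, if_neg hlt]

-- ===== VERDICT (by name: the statement is the Claim_ definition above) =====
theorem int_spiral_spec : Claim_equal_int_spiral := by
  unfold Claim_equal_int_spiral Spec_int_spiral
  intro N _
  unfold int_spiral int_spiral_alt
  by_cases h2 : (2 : Int) ≤ N
  · have hfe : (N - 1).toNat = (N - 2).toNat + 1 := by omega
    rw [hfe]
    simp only [pvLoopA, pvLoopB]
    rw [if_pos (by simp only [List.length_cons, List.length_nil]; omega :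
          ((([((0:Int),(0:Int))] : List (Int × Int)).length : Int)) < N)]
    rw [if_pos (by simp only [List.length_cons, List.length_nil]; omega :
          ((([((0:Int),(0:Int))] : List (Int × Int)).length : Int)) < N)]
    rw [pvDir_0]
    have hm : ((1 + -1, 0 + 0) : Int × Int) ∈
        PySem.Set.add (PySem.Set.add PySem.Set.empty ((0:Int), (0:Int))) ((1:Int), (0:Int)) := by decide
    rw [if_pos ((PySem.Set.contains_iff _ _).mpr hm), if_pos (by norm_num : (1:Int) - 1 = 0)]
    have hmod : PySem.Int.mod ((0:Int) + 1) 4 = 1 := by decide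
    rw [hmod]
    simp only [add_zero, zero_add, Bool.false_eq_true, if_false, Bool.not_false]
    apply pv_sync
    have hseenlit : PySem.Set.add (PySem.Set.add PySem.Set.empty ((0:Int), (0:Int))) ((1:Int), (0:Int))
        = [((0:Int), (0:Int)), ((1:Int), (0:Int))] := by decide
    refine ⟨0, le_refl 0, Or.inr (Or.inl ⟨rfl, by omega, by omega, by omega, by omega, by omega, rfl,
      by omega, by omega, rfl, rfl, rfl, rfl, fun u v => ?_⟩)⟩
    rw [hseenlit]
    simp only [List.mem_cons, List.not_mem_nil, or_false, Prod.mk.injEq]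
    omega
  · have hf0 : (N - 1).toNat = 0 := by omega
    rw [hf0]
    rfl
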